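-- pv_equiv track=rewrite | github.com/KelvinHelmut/Grupo-Estudio-Python | Unidad 5/Ejercicios Libro/Sem5Lib3+aek6.py | esPositivo
-- ===== SOURCE A (Python) =====
-- def esPositivo( texto ):
-- 	punto = 0
-- 	for e in texto:
-- 		if not esNumero(e):
-- 			if e == '.' and punto == 0:#si solo tiene un punto es numero
-- 				punto += 1
-- 			else:
-- 				return False
-- 	return True
--
-- def esNumero( e ):
-- 	for n in ('0','1','2','3','4','5','6','7','8','9'):
-- 		if e == n:
-- 			return True
-- 	return False
-- ===== SOURCE B (Python) =====
-- def esPositivo(texto):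
--     s = texto.replace('.', '', 1)
--     return all(c in '0123456789' for c in s)
-- ===== Notes on version B (the rewrite author's own statement) =====
-- stated objective: simpler
-- what changed: B removes the first dot with replace('.','',1) and then checks every remaining character is in '0123456789' with all(), eliminating A's stateful punto counter and early-return loop.
import Mathlib
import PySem

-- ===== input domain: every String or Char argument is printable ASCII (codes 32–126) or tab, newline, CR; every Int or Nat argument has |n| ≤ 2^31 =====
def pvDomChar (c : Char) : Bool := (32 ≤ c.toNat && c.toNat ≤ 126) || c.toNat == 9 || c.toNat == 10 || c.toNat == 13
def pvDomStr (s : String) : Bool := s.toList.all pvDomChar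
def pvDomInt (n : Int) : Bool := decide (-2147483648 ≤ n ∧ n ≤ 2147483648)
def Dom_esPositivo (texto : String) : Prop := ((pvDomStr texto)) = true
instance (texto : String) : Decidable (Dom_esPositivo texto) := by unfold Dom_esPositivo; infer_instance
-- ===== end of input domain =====

-- B replaces A's stateful one-dot counter loop by: drop the first '.', then check all chars are '0'-'9' (simpler decomposition).
-- ===== PORT A =====
-- 'for n in ('0',...,'9'): if e == n: return True / return False'
def esNumeroLoop (e : Char) : List Char → Bool
  | [] => false
  | n :: rest => if e == n then true else esNumeroLoop e rest

def esNumero (e : Char) : Bool :=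
  esNumeroLoop e ['0','1','2','3','4','5','6','7','8','9']

-- the main loop, carrying 'punto' and early-returning false
def esPositivoLoop : List Char → Int → Bool
  | [], _ => true
  | e :: rest, punto =>
    if !esNumero e then
      if e == '.' && punto == 0 then esPositivoLoop rest (punto + 1)
      else false
    else esPositivoLoop rest punto

def esPositivo (texto : String) : Bool :=
  esPositivoLoop texto.toList 0

-- ===== PORT B =====
-- texto.replace('.', '', 1): remove the first '.' only
def removeFirstDot : List Char → List Char
  | [] => []
  | c :: rest => if c == '.' then rest else c :: removeFirstDot rest

-- c in '0123456789'
def esDigito (c : Char) : Bool := ("0123456789".toList).contains c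

def esPositivo_alt (texto : String) : Bool :=
  (removeFirstDot texto.toList).all esDigito

-- ===== PRECONDITION & SPEC =====
def Spec_esPositivo (texto : String) (out : Bool) : Prop := out = esPositivo_alt texto
instance (texto : String) (out : Bool) : Decidable (Spec_esPositivo texto out) := by unfold Spec_esPositivo; infer_instance

-- ===== CLAIM (what is proved, stated in full; the proofs are below) =====
def Claim_equal_esPositivo : Prop := ∀ (texto : String), Dom_esPositivo texto → Spec_esPositivo texto (esPositivo texto)

-- ===== LEMMAS AND PROOFS =====

-- ===== VERDICT (by name: the statement is the Claim_ definition above) =====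
theorem esNumero_eq_esDigito (c : Char) : esNumero c = esDigito c := by
  show esNumeroLoop c ['0','1','2','3','4','5','6','7','8','9'] =
    List.contains ['0','1','2','3','4','5','6','7','8','9'] c
  simp only [esNumeroLoop, List.contains_cons, List.contains_nil]
  by_cases h0 : c == '0' <;> by_cases h1 : c == '1' <;> by_cases h2 : c == '2' <;>
    by_cases h3 : c == '3' <;> by_cases h4 : c == '4' <;> by_cases h5 : c == '5' <;>
    by_cases h6 : c == '6' <;> by_cases h7 : c == '7' <;> by_cases h8 : c == '8' <;>
    by_cases h9 : c == '9' <;> simp_all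

theorem loop_one (l : List Char) : esPositivoLoop l 1 = l.all esDigito := by
  induction l with
  | nil => rfl
  | cons e rest ih =>
    simp only [esPositivoLoop, List.all_cons, esNumero_eq_esDigito] at *
    by_cases h : esDigito e <;> simp [h, ih]

theorem loop_zero (l : List Char) :
    esPositivoLoop l 0 = (removeFirstDot l).all esDigito := by
  induction l with
  | nil => rfl
  | cons e rest ih =>
    by_cases hd : e = '.'
    · subst hd
      simp [esPositivoLoop, removeFirstDot, esNumero_eq_esDigito, esDigito, loop_one]
    · by_cases h : esDigito e
      · simp [esPositivoLoop, removeFirstDot, esNumero_eq_esDigito, h, hd, ih]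
      · simp [esPositivoLoop, removeFirstDot, esNumero_eq_esDigito, h, hd]

theorem esPositivo_spec : Claim_equal_esPositivo := by
  intro texto _
  unfold Spec_esPositivo esPositivo esPositivo_alt
  exact loop_zero _
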